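-- pv_equiv track=rewrite | github.com/mhsn08/Programmig-Fundamentals-fall-20 | assignment4/a05.py | get_countries
-- ===== SOURCE A (Python) =====
-- def get_countries(company_list):
--     req_dict = {}
--     for i in company_list:
--         x = i["Country"]
--         if x in req_dict:
--             y = req_dict[x]
--             y = y+1
--             req_dict[x] = y
--         else:
--             req_dict[x] = 1
--     return req_dict
-- ===== SOURCE B (Python) =====
-- def get_countries(company_list):
--     countries = [i["Country"] for i in company_list]
--
--     def go(lst):
--         if not lst:
--             return {}
--         c = lst[0]
--         rest = [x for x in lst if x != c]
--         d = {c: len(lst) - len(rest)}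
--         d.update(go(rest))
--         return d
--
--     return go(countries)
-- ===== Notes on version B (the rewrite author's own statement) =====
-- stated objective: alternative
-- what changed: Replaces A's single accumulating dict pass with a recursive partition over the projected country column: take the first country, count it as the length drop after filtering it out, and recurse on the remainder.
import Mathlib
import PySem

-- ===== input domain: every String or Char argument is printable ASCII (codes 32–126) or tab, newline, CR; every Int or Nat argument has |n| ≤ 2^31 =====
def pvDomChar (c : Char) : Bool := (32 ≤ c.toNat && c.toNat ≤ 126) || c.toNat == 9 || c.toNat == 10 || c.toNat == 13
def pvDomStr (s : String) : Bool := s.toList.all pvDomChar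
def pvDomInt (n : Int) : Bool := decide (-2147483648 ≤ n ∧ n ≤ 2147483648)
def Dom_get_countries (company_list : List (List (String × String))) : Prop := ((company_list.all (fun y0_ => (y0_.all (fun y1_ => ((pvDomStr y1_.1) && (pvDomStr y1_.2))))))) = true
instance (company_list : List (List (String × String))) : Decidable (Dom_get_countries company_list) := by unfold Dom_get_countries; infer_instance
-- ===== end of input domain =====

-- B counts by recursive partition over the projected country column instead of A's
-- single accumulating dict pass; same result, no speed claim.
-- Returned dicts are association lists; both ports list keys in first-occurrence order.

-- ===== PORT A =====
-- The loop threads Option: none = the KeyError i["Country"] would raise (excluded by Pre_).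
-- req_dict[x] inside the 'x in req_dict' branch is d.getD x 0 (the guard makes the default unreachable).
def get_countries (company_list : List (List (String × String))) : List (String × Int) :=
  match company_list.foldl
      (fun od i => od.bind (fun d =>
        ((PySem.Dict.ofList i).get? "Country").map (fun x =>
          if d.contains x then
            d.insert x (d.getD x 0 + 1)
          else
            d.insert x 1)))
      (some (PySem.Dict.empty : PySem.Dict String Int)) with
  | some d => d.items
  | none => []

-- ===== PORT B =====
-- Source B's inner 'go': head country, filter it out of the whole list, count = length drop, recurse.
def goCountries : List String → List (String × Int)
  | [] => []
  | c :: t =>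
    let rest := (c :: t).filter (fun x => x != c)
    (c, ((c :: t).length : Int) - (rest.length : Int)) :: goCountries rest
  termination_by l => l.length
  decreasing_by
    simp only [List.filter, bne_self_eq_false, List.length_cons]
    exact Nat.lt_succ_of_le (List.length_filter_le _ _)

-- i["Country"] ported as getD with a dummy default: Pre_ guarantees the key is present
-- (outside Pre_ the Python raises and nothing is claimed).
def get_countries_alt (company_list : List (List (String × String))) : List (String × Int) :=
  let countries := company_list.map (fun i => (PySem.Dict.ofList i).getD "Country" "")
  goCountries countries

-- ===== PRECONDITION & SPEC =====
-- Pre_: every record has a "Country" key; otherwise both Pythons raise KeyError.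
def Pre_get_countries (company_list : List (List (String × String))) : Prop :=
  (company_list.all (fun i => (PySem.Dict.ofList i).contains "Country")) = true
instance (company_list : List (List (String × String))) : Decidable (Pre_get_countries company_list) := by unfold Pre_get_countries; infer_instance

def pvWitness_get_countries : (List (List (String × String))) :=
  [[("Country", "PK"), ("Name", "Systems")], [("Country", "US")], [("Country", "PK")]]

def Spec_get_countries (company_list : List (List (String × String))) (out : List (String × Int)) : Prop := out = get_countries_alt company_list
instance (company_list : List (List (String × String))) (out : List (String × Int)) : Decidable (Spec_get_countries company_list out) := by unfold Spec_get_countries; infer_instance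

-- ===== CLAIM (what is proved, stated in full; the proofs are below) =====
def Claim_equal_get_countries : Prop := ∀ (company_list : List (List (String × String))), Dom_get_countries company_list → Pre_get_countries company_list → Spec_get_countries company_list (get_countries company_list)

-- ===== LEMMAS AND PROOFS =====

-- A's Option-threaded loop, when every record has the key, is the plain counting loop
-- over the projected country column (both branches of A are 'insert x (getD x 0 + 1)').
lemma get_countries_fold_some (l : List (List (String × String)))
    (d : PySem.Dict String Int)
    (h : ∀ i ∈ l, (PySem.Dict.ofList i).contains "Country" = true) :
    l.foldl
      (fun od i => od.bind (fun d =>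
        ((PySem.Dict.ofList i).get? "Country").map (fun x =>
          if d.contains x then
            d.insert x (d.getD x 0 + 1)
          else
            d.insert x 1)))
      (some d)
    = some ((l.map (fun i => (PySem.Dict.ofList i).getD "Country" "")).foldl
        (fun d x => d.insert x (d.getD x 0 + 1)) d) := by
  induction l generalizing d with
  | nil => rfl
  | cons i t ih =>
    have hc : (PySem.Dict.ofList i).contains "Country" = true := h i (by simp)
    obtain ⟨v, hv⟩ : ∃ v, (PySem.Dict.ofList i).get? "Country" = some v := by
      rw [PySem.Dict.contains_eq_isSome_get?] at hc
      exact Option.isSome_iff_exists.mp hc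
    have hgd : (PySem.Dict.ofList i).getD "Country" "" = v :=
      PySem.Dict.getD_of_get?_eq_some _ "" hv
    simp only [List.foldl_cons, List.map_cons, Option.bind_some, hv, Option.map_some, hgd]
    rw [ih _ (fun j hj => h j (by simp [hj]))]
    congr 2
    by_cases hd : d.contains v = true
    · simp [hd]
    · simp only [Bool.not_eq_true] at hd
      rw [if_neg (by simp [hd]), PySem.Dict.getD_of_not_contains _ _ hd]
      norm_num

-- Folding Set.add from an accumulator headed by c skips every later c.
lemma foldl_add_cons (c : String) :
    ∀ (t s : List String),
    t.foldl PySem.Set.add (c :: s)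
      = c :: (t.filter (fun x => x != c)).foldl PySem.Set.add s := by
  intro t
  induction t with
  | nil => intro s; rfl
  | cons x t ih =>
    intro s
    by_cases hx : x = c
    · subst hx
      simp only [List.foldl_cons, List.filter_cons, bne_self_eq_false, Bool.false_eq_true,
        if_false, PySem.Set.add, PySem.Set.contains, List.contains_cons, BEq.rfl,
        Bool.true_or, if_true]
      exact ih s
    · have hb : (x != c) = true := by simp [bne, hx]
      simp only [List.foldl_cons, List.filter_cons, hb, if_true, PySem.Set.add,
        PySem.Set.contains, List.contains_cons]
      have hcx : (x == c) = false := by simp [hx]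
      simp only [hcx, Bool.false_or]
      by_cases hm : List.contains s x = true
      · simp only [hm, if_true]
        exact ih s
      · simp only [Bool.not_eq_true] at hm
        simp only [hm, Bool.false_eq_true, if_false]
        exact ih (s ++ [x])

lemma set_ofList_cons (c : String) (t : List String) :
    PySem.Set.ofList (c :: t) = c :: PySem.Set.ofList (t.filter (fun x => x != c)) := by
  rw [PySem.Set.ofList_eq_foldl, PySem.Set.ofList_eq_foldl]
  simpa [PySem.Set.add, PySem.Set.empty] using foldl_add_cons c t []

-- count c t + |t with c removed| = |t|.
lemma count_add_filter_length (c : String) (t : List String) :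
    t.count c + (t.filter (fun x => x != c)).length = t.length := by
  induction t with
  | nil => rfl
  | cons x t ih =>
    simp only [bne] at ih ⊢
    by_cases h : x = c <;> simp [h] <;> omega

-- goCountries computes Counter-as-items of its argument.
lemma goCountries_eq : ∀ (n : Nat) (l : List String), l.length ≤ n →
    goCountries l = (PySem.Set.ofList l).map (fun c => (c, (l.count c : Int))) := by
  intro n
  induction n with
  | zero =>
    intro l hl
    have : l = [] := List.eq_nil_of_length_eq_zero (Nat.le_zero.mp hl)
    subst this; simp [goCountries]
  | succ n ih =>
    intro l hl
    match l with
    | [] => simp [goCountries]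
    | c :: t =>
      rw [goCountries]
      have hfc : (c :: t).filter (fun x => x != c) = t.filter (fun x => x != c) := by
        simp
      have hlen : (t.filter (fun x => x != c)).length ≤ n := by
        have := List.length_filter_le (fun x => x != c) t
        simp only [List.length_cons] at hl
        omega
      rw [set_ofList_cons, List.map_cons]
      simp only [hfc]
      rw [ih _ hlen]
      congr 1
      · -- head: length drop = count of c
        have hk := count_add_filter_length c t
        have hcount : (c :: t).count c = t.count c + 1 := by simp
        simp only [Prod.mk.injEq, List.length_cons, hcount, true_and]
        push_cast
        omega
      · -- tail: counts of other countries survive the filter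
        apply List.map_congr_left
        intro d hd
        have hmem : d ∈ t.filter (fun x => x != c) := by
          rw [PySem.Set.mem_ofList] at hd; exact hd
        have hdne : (d == c) = false := by
          have := (List.mem_filter.mp hmem).2
          simpa [bne] using this
        have hne : ¬ c = d := fun h => by subst h; simp at hdne
        have hcnt : (t.filter (fun x => x != c)).count d = t.count d := by
          apply List.count_filter
          simp [bne, hdne]
        rw [hcnt]
        have : (c :: t).count d = t.count d := by
          simp [hne]
        rw [this]

-- ===== VERDICT (by name: the statement is the Claim_ definition above) =====
theorem get_countries_spec : Claim_equal_get_countries := by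
  intro company_list _ hpre
  unfold Spec_get_countries get_countries get_countries_alt
  have h : ∀ i ∈ company_list, (PySem.Dict.ofList i).contains "Country" = true := by
    unfold Pre_get_countries at hpre
    simpa [List.all_eq_true] using hpre
  rw [get_countries_fold_some company_list PySem.Dict.empty h]
  simp only []
  rw [PySem.Dict.foldl_insert_getD_add_one_eq_counter, PySem.Dict.items_counter]
  exact (goCountries_eq _ _ le_rfl).symm
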